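-- pv_equiv track=rewrite | github.com/Init-mb46/AOC-2025 | Day1/day1.py | part1
-- ===== SOURCE A (Python) =====
-- start_value = 50
--
-- def part1(input):
--     value = start_value
--     total = 0
--     for line in input:
--         if line.startswith('L'):
--             value -= int(line[1:])
--         elif line.startswith('R'):
--             value += int(line[1:])
--         value = value % 100
--         if value == 0:
--             total += 1
--     return total
-- ===== SOURCE B (Python) =====
-- start_value = 50
--
-- def part1(input):
--     def delta(line):
--         if line.startswith('L'):
--             return -int(line[1:])
--         if line.startswith('R'):
--             return int(line[1:])
--         return 0
--
--     deltas = [delta(line) for line in input]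
--     total = sum(deltas)
--     # Build the suffix sums T_n, T_{n-1}, ..., T_1 back-to-front
--     # (T_k = sum of deltas[k:]); position after line i is start + total - T_{i+1},
--     # so it is divisible by 100 iff T_{i+1} % 100 == (start + total) % 100.
--     suffix = []
--     t = 0
--     for d in reversed(deltas):
--         suffix.append(t)
--         t += d
--     target = (start_value + total) % 100
--     return sum(1 for s in suffix if s % 100 == target)
-- ===== Notes on version B (the rewrite author's own statement) =====
-- stated objective: alternative
-- what changed: Instead of A's forward pass tracking the running mod-100 position, B traverses the deltas back-to-front building suffix sums and, using the congruence (position after line i) % 100 == 0 iff suffix_sum(i+1) % 100 == (50 + total) % 100, counts suffix sums congruent to 50 plus the grand total.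
import Mathlib
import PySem

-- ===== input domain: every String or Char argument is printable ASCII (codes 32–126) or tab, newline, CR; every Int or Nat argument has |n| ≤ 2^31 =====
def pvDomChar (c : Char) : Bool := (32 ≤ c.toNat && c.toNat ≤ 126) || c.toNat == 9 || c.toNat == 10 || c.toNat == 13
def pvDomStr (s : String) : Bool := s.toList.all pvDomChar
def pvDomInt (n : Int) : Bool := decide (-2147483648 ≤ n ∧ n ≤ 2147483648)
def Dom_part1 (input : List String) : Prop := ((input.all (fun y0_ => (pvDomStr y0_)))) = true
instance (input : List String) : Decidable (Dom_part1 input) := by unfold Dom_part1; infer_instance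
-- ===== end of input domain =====

-- B replaces A's forward pass over the running mod-100 position by a back-to-front pass
-- building suffix sums of the deltas, counting those congruent to 50 + total mod 100
-- (objective: alternative algorithm; same return value).

-- ===== PORT A =====
-- A's loop, step for step: value updated by L/R, reduced mod 100, counter bumped on zero.
def part1 (input : List String) : Int :=
  (input.foldl (fun (st : Int × Int) line =>
    let value := st.1
    let total := st.2
    let value :=
      if PySem.Str.startswith line "L" then
        value - (PySem.Int.ofStr? (PySem.Str.slice line (some 1) none)).getD 0
      else if PySem.Str.startswith line "R" then
        value + (PySem.Int.ofStr? (PySem.Str.slice line (some 1) none)).getD 0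
      else value
    let value := PySem.Int.mod value 100
    let total := if value = 0 then total + 1 else total
    (value, total)) (50, 0)).2

-- ===== PORT B =====
def pvDelta (line : String) : Int :=
  if PySem.Str.startswith line "L" then
    -(PySem.Int.ofStr? (PySem.Str.slice line (some 1) none)).getD 0
  else if PySem.Str.startswith line "R" then
    (PySem.Int.ofStr? (PySem.Str.slice line (some 1) none)).getD 0
  else 0

def part1_alt (input : List String) : Int :=
  let deltas := input.map pvDelta
  let total := deltas.sum
  -- Python: suffix=[]; t=0; for d in reversed(deltas): suffix.append(t); t += d
  let st := deltas.reverse.foldl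
    (fun (st : Int × List Int) d => (st.1 + d, st.2 ++ [st.1])) (0, [])
  let target := PySem.Int.mod (50 + total) 100
  ((st.2.countP (fun s => PySem.Int.mod s 100 == target) : Nat) : Int)

-- ===== PRECONDITION & SPEC =====
-- Pre_ excludes inputs where int(line[1:]) raises ValueError on an L/R line (A raises there).
def Pre_part1 (input : List String) : Prop :=
  (input.all (fun line =>
    !(PySem.Str.startswith line "L" || PySem.Str.startswith line "R") ||
      (PySem.Int.ofStr? (PySem.Str.slice line (some 1) none)).isSome)) = true
instance (input : List String) : Decidable (Pre_part1 input) := by unfold Pre_part1; infer_instance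
def pvWitness_part1 : List String := ["L12", "R62", "up", "R100"]
def Spec_part1 (input : List String) (out : Int) : Prop := out = part1_alt input
instance (input : List String) (out : Int) : Decidable (Spec_part1 input out) := by unfold Spec_part1; infer_instance

-- ===== CLAIM (what is proved, stated in full; the proofs are below) =====
def Claim_equal_part1 : Prop := ∀ (input : List String), Dom_part1 input → Pre_part1 input → Spec_part1 input (part1 input)

-- ===== LEMMAS AND PROOFS =====

-- A's loop body as a named function (definitionally equal to the lambda in part1).
def stepA (st : Int × Int) (line : String) : Int × Int :=
  let value := st.1
  let total := st.2
  let value :=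
    if PySem.Str.startswith line "L" then
      value - (PySem.Int.ofStr? (PySem.Str.slice line (some 1) none)).getD 0
    else if PySem.Str.startswith line "R" then
      value + (PySem.Int.ofStr? (PySem.Str.slice line (some 1) none)).getD 0
    else value
  let value := PySem.Int.mod value 100
  let total := if value = 0 then total + 1 else total
  (value, total)

lemma part1_eq_stepA (input : List String) :
    part1 input = (input.foldl stepA (50, 0)).2 := rfl

-- A's prefix-sum count form: zeros of the running position started at c.
def prefCount (c : Int) (l : List Int) : Nat :=
  ((List.scanl (· + ·) c l).drop 1).countP (fun p => PySem.Int.mod p 100 == 0)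

-- One A-step on the value equals adding the delta and reducing mod 100.
lemma stepA_value (v : Int) (line : String) :
    PySem.Int.mod
      (if PySem.Str.startswith line "L" then
        v - (PySem.Int.ofStr? (PySem.Str.slice line (some 1) none)).getD 0
      else if PySem.Str.startswith line "R" then
        v + (PySem.Int.ofStr? (PySem.Str.slice line (some 1) none)).getD 0
      else v) 100
    = PySem.Int.mod (v + pvDelta line) 100 := by
  unfold pvDelta
  split_ifs <;> ring_nf

lemma stepA_eq (v t : Int) (line : String) :
    stepA (v, t) line
      = (PySem.Int.mod (v + pvDelta line) 100,
         if PySem.Int.mod (v + pvDelta line) 100 = 0 then t + 1 else t) := by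
  simp only [stepA]
  rw [stepA_value]

lemma mod_add_mod (v d : Int) :
    PySem.Int.mod (PySem.Int.mod v 100 + d) 100 = PySem.Int.mod (v + d) 100 := by
  simp only [PySem.Int.mod_eq_emod_of_pos (by norm_num : (0:Int) < 100)]
  omega

lemma scanl_head_tail (b : Int) (l : List Int) :
    List.scanl (· + ·) b l = b :: (List.scanl (· + ·) b l).tail := by
  cases l <;> simp [List.scanl]

-- Invariant: A's fold from (mod v 100, t) computes t plus the prefix-sum zero count from s,
-- whenever v ≡ s (mod 100).
lemma fold_eq_scanl (input : List String) :
    ∀ (v s t : Int), PySem.Int.mod v 100 = PySem.Int.mod s 100 →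
    (input.foldl stepA (PySem.Int.mod v 100, t)).2
    = t + (prefCount s (input.map pvDelta) : Int) := by
  induction input with
  | nil => intro v s t _; simp [prefCount]
  | cons line rest ih =>
    intro v s t hvs
    have hcong : PySem.Int.mod (PySem.Int.mod v 100 + pvDelta line) 100
        = PySem.Int.mod (s + pvDelta line) 100 := by
      rw [mod_add_mod, ← mod_add_mod v, hvs, mod_add_mod]
    simp only [List.foldl_cons, stepA_eq, prefCount, List.map_cons, List.scanl_cons,
      List.drop_succ_cons]
    rw [hcong, ih (s + pvDelta line) (s + pvDelta line) _ rfl,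
      scanl_head_tail (s + pvDelta line)]
    simp only [List.drop, List.countP_cons, prefCount]
    simp only [PySem.Int.mod_eq_zero_iff_dvd]
    by_cases h : (100:Int) ∣ s + pvDelta line
    · simp [h]; ring
    · simp [h]

-- B's suffix fold, written as a foldr on the un-reversed list.
def sufR (l : List Int) : Int × List Int :=
  l.foldr (fun d st => (st.1 + d, st.2 ++ [st.1])) (0, [])

lemma sufR_fst (l : List Int) : (sufR l).1 = l.sum := by
  induction l with
  | nil => rfl
  | cons d l ih => simp [sufR, List.foldr_cons] at *; omega

lemma sufR_cons (d : Int) (l : List Int) :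
    sufR (d :: l) = (l.sum + d, (sufR l).2 ++ [l.sum]) := by
  simp [sufR, List.foldr_cons, ← sufR_fst l]

-- Key counting lemma: suffix sums congruent to c + total correspond exactly to
-- prefix positions (started at c) divisible by 100.
lemma suffix_count_eq_prefCount (l : List Int) :
    ∀ c : Int, ((sufR l).2.countP
        (fun s => PySem.Int.mod s 100 == PySem.Int.mod (c + l.sum) 100))
      = prefCount c l := by
  induction l with
  | nil => intro c; simp [sufR, prefCount]
  | cons d l ih =>
    intro c
    rw [sufR_cons]
    simp only [List.countP_append, List.countP_cons, List.countP_nil]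
    have hpred : ∀ s : Int,
        (PySem.Int.mod s 100 == PySem.Int.mod (c + (d :: l).sum) 100)
          = (PySem.Int.mod s 100 == PySem.Int.mod ((c + d) + l.sum) 100) := by
      intro s; simp [List.sum_cons]; ring_nf
    simp only [hpred, ih (c + d)]
    have hlast : (PySem.Int.mod l.sum 100 == PySem.Int.mod ((c + d) + l.sum) 100)
        = (PySem.Int.mod (c + d) 100 == 0) := by
      simp only [PySem.Int.mod_eq_emod_of_pos (by norm_num : (0:Int) < 100)]
      by_cases h : (c + d) % 100 = 0 <;> simp [h] <;> omega
    rw [hlast]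
    unfold prefCount
    simp only [List.scanl_cons, List.drop_succ_cons]
    rw [scanl_head_tail (c + d)]
    simp only [List.drop, List.countP_cons]
    simp

-- B in terms of sufR.
lemma part1_alt_eq (input : List String) :
    part1_alt input
      = (((sufR (input.map pvDelta)).2.countP
          (fun s => PySem.Int.mod s 100 ==
            PySem.Int.mod (50 + (input.map pvDelta).sum) 100) : Nat) : Int) := by
  simp only [part1_alt, sufR, List.foldl_reverse]

-- ===== VERDICT (by name: the statement is the Claim_ definition above) =====
theorem part1_spec : Claim_equal_part1 := by
  intro input _ _
  unfold Spec_part1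
  rw [part1_eq_stepA, part1_alt_eq, suffix_count_eq_prefCount]
  have h := fold_eq_scanl input 50 50 0 rfl
  rw [show PySem.Int.mod (50:Int) 100 = 50 from by decide] at h
  rw [h]; simp
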